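-- pv_equiv track=rewrite | github.com/nuualab/arithmetic2pycode | lib/CodeLabelSimplifer.py | convert_math_method
-- ===== SOURCE A (Python) =====
-- def convert_math_method(parsed_list):
--
--     result = list()
--
--     if 'math' not in parsed_list:
--         return parsed_list
--
--     skip_index_list = list()
--
--     for i in range(0, len(parsed_list)):
--
--         if i in skip_index_list:
--             continue
--
--         p = parsed_list[i]
--
--         if i == len(parsed_list) - 1:
--             result.append(p)
--             continue
--
--         n_p = parsed_list[i+1]
--
--         if p == 'math' and n_p == '.':
--             method = parsed_list[i+2]
--             if method == 'perm':
--                 result.append('func_perm')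
--                 skip_index_list.append(i+1)
--                 skip_index_list.append(i+2)
--             elif method == 'lcm':
--                 result.append('func_lcm')
--                 skip_index_list.append(i+1)
--                 skip_index_list.append(i+2)
--             elif method == 'comb':
--                 result.append('func_comb')
--                 skip_index_list.append(i+1)
--                 skip_index_list.append(i+2)
--             else:
--                 result.append(p)
--         else:
--             result.append(p)
--
--     return result
-- ===== SOURCE B (Python) =====
-- def convert_math_method(parsed_list):
--     # Single forward scan with an explicit index that jumps past consumed
--     # tokens; no skip_index_list is maintained.
--     if 'math' not in parsed_list:
--         return parsed_list
--     result = []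
--     n = len(parsed_list)
--     i = 0
--     while i < n:
--         if i + 2 < n and parsed_list[i] == 'math' and parsed_list[i + 1] == '.':
--             m = parsed_list[i + 2]
--             if m == 'perm':
--                 result.append('func_perm'); i += 3; continue
--             if m == 'lcm':
--                 result.append('func_lcm'); i += 3; continue
--             if m == 'comb':
--                 result.append('func_comb'); i += 3; continue
--         result.append(parsed_list[i])
--         i += 1
--     return result
-- ===== Notes on version B (the rewrite author's own statement) =====
-- stated objective: simpler
-- what changed: Replaces the for-loop that records skipped positions in a skip_index_list (checked by membership on every iteration) with a single while loop whose index simply jumps 3 past each consumed 'math' '.' method triple, so no skip list exists at all.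
-- crash fix: On lists ending with the pair 'math', '.' A raises IndexError reading parsed_list[i+2]; B returns the tokens copied unchanged. — e.g. on convert_math_method(["math", "."]): A raises IndexError, B returns ["math", "."]
import Mathlib
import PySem

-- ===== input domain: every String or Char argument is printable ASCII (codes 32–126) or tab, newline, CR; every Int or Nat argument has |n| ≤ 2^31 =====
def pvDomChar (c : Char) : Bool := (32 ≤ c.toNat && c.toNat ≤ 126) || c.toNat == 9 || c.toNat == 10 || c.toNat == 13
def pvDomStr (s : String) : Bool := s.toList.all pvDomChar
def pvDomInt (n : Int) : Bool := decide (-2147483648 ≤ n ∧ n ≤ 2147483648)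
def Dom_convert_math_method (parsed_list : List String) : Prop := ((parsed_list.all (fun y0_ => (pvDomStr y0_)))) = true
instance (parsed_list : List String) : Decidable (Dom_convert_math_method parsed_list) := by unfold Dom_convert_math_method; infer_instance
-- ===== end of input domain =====

-- B replaces A's for-loop-with-skip_index_list by a single while loop whose index jumps
-- past consumed tokens (objective: simpler — no skip list is maintained).


-- ===== PORT A =====
-- loop body of A's for-loop; state = (result, skip_index_list)
def stepA (l : List String) (st : List String × List Int) (i : Int) : List String × List Int :=
  let result := st.1
  let skip := st.2
  if i ∈ skip then st
  else
    let p := PySem.List.pyGetD l i ""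
    if i = (l.length : Int) - 1 then (result ++ [p], skip)
    else
      let n_p := PySem.List.pyGetD l (i + 1) ""
      if p = "math" ∧ n_p = "." then
        -- Python raises IndexError here when i+2 = len (excluded by Pre_); the default is never read inside Pre_
        let method := PySem.List.pyGetD l (i + 2) ""
        if method = "perm" then (result ++ ["func_perm"], skip ++ [i + 1, i + 2])
        else if method = "lcm" then (result ++ ["func_lcm"], skip ++ [i + 1, i + 2])
        else if method = "comb" then (result ++ ["func_comb"], skip ++ [i + 1, i + 2])
        else (result ++ [p], skip)
      else (result ++ [p], skip)

def convert_math_method (parsed_list : List String) : List String :=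
  if "math" ∉ parsed_list then parsed_list
  else
    ((PySem.List.pyRange 0 (parsed_list.length : Int) 1).foldl (stepA parsed_list) ([], [])).1

-- ===== PORT B =====
-- B's while loop: index i, jumping by 3 over a consumed 'math' '.' method triple
def altGo (l : List String) (i : Nat) : List String :=
  if _h : i < l.length then
    if i + 2 < l.length ∧ l.getD i "" = "math" ∧ l.getD (i + 1) "" = "." then
      let m := l.getD (i + 2) ""
      if m = "perm" then "func_perm" :: altGo l (i + 3)
      else if m = "lcm" then "func_lcm" :: altGo l (i + 3)
      else if m = "comb" then "func_comb" :: altGo l (i + 3)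
      else l.getD i "" :: altGo l (i + 1)
    else l.getD i "" :: altGo l (i + 1)
  else []
termination_by l.length - i

def convert_math_method_alt (parsed_list : List String) : List String :=
  if "math" ∉ parsed_list then parsed_list
  else altGo parsed_list 0

-- ===== PRECONDITION & SPEC =====
-- Pre_ excludes exactly the inputs ending in the pair 'math', '.', on which the Python A
-- raises IndexError (it reads parsed_list[i+2] for i = len-2).
def Pre_convert_math_method (parsed_list : List String) : Prop :=
  parsed_list.drop (parsed_list.length - 2) ≠ ["math", "."]
instance (parsed_list : List String) : Decidable (Pre_convert_math_method parsed_list) := by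
  unfold Pre_convert_math_method; infer_instance

def pvWitness_convert_math_method : List String := ["math", ".", "perm", "(", "3", ")"]

-- A raises IndexError exactly on lists ending in the pair 'math', '.'; B returns the tokens
-- copied unchanged there (the incomplete call is left as it is).
def Raises_convert_math_method (parsed_list : List String) : Prop :=
  parsed_list.drop (parsed_list.length - 2) = ["math", "."]
instance (parsed_list : List String) : Decidable (Raises_convert_math_method parsed_list) := by
  unfold Raises_convert_math_method; infer_instance
def pvRaiseWitness_convert_math_method : List String := ["math", "."]
def pvRaiseWitnessOut_convert_math_method : List String := ["math", "."]

def Spec_convert_math_method (parsed_list : List String) (out : List String) : Prop :=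
  out = convert_math_method_alt parsed_list
instance (parsed_list : List String) (out : List String) : Decidable (Spec_convert_math_method parsed_list out) := by
  unfold Spec_convert_math_method; infer_instance

-- ===== CLAIM (what is proved, stated in full; the proofs are below) =====
def Claim_equal_convert_math_method : Prop := ∀ (parsed_list : List String), Dom_convert_math_method parsed_list → Pre_convert_math_method parsed_list → Spec_convert_math_method parsed_list (convert_math_method parsed_list)

def Claim_raises_convert_math_method : Prop := (∀ (parsed_list : List String), Dom_convert_math_method parsed_list → Raises_convert_math_method parsed_list → ¬ Pre_convert_math_method parsed_list) ∧ (Dom_convert_math_method (pvRaiseWitness_convert_math_method) ∧ Raises_convert_math_method (pvRaiseWitness_convert_math_method) ∧ convert_math_method_alt (pvRaiseWitness_convert_math_method) = pvRaiseWitnessOut_convert_math_method)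

-- ===== LEMMAS AND PROOFS =====

-- the last two elements of a list of length ≥ 2
lemma drop_sub_two (l : List String) (h : 2 ≤ l.length) :
    l.drop (l.length - 2) = [l.getD (l.length - 2) "", l.getD (l.length - 1) ""] := by
  have h1 : l.length - 2 < l.length := by omega
  have h2 : l.length - 1 < l.length := by omega
  rw [List.drop_eq_getElem_cons h1]
  have e1 : l.length - 2 + 1 = l.length - 1 := by omega
  rw [e1, List.drop_eq_getElem_cons h2]
  have e2 : l.length - 1 + 1 = l.length := by omega
  rw [e2, List.drop_length]
  rw [List.getD_eq_getElem l "" h1, List.getD_eq_getElem l "" h2]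

-- main loop correspondence: A's foldl with a skip list, started at index i with every
-- recorded skip index in the past, produces what B's jumping loop produces from i
lemma loop_eq (l : List String) (hPre : Pre_convert_math_method l) :
    ∀ (k i : Nat), l.length - i ≤ k →
      ∀ (S : List Int) (res : List String), (∀ j ∈ S, j < (i : Int)) →
        ((PySem.List.pyRange (i : Int) (l.length : Int) 1).foldl (stepA l) (res, S)).1
          = res ++ altGo l i := by
  intro k
  induction k with
  | zero =>
    intro i hk S res _
    rw [PySem.List.pyRange_one_eq_nil (by omega), altGo, dif_neg (by omega)]
    simp
  | succ k ih =>
    intro i hk S res hS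
    by_cases hi : i < l.length
    · rw [PySem.List.pyRange_one_cons (by exact_mod_cast hi)]
      have e1 : (i : Int) + 1 = ((i + 1 : Nat) : Int) := by push_cast; ring
      have e2 : (i : Int) + 2 = ((i + 2 : Nat) : Int) := by push_cast; ring
      simp only [List.foldl_cons, stepA, e1, e2, PySem.List.pyGetD_natCast]
      rw [if_neg (fun h => by have := hS _ h; omega)]
      rw [altGo, dif_pos hi]
      by_cases hlast : i = l.length - 1
      · rw [if_pos (by omega)]
        rw [PySem.List.pyRange_one_eq_nil (by omega)]
        rw [if_neg (by omega), altGo, dif_neg (by omega)]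
        simp
      · rw [if_neg (by omega)]
        by_cases hm : l.getD i "" = "math" ∧ l.getD (i + 1) "" = "."
        · by_cases hend : i + 2 < l.length
          · rw [if_pos hm, if_pos (show i + 2 < l.length ∧ _ ∧ _ from ⟨hend, hm.1, hm.2⟩)]
            have hskip2 : ∀ (resX : List String),
                ((PySem.List.pyRange ((i + 1 : Nat) : Int) (l.length : Int) 1).foldl
                    (stepA l) (resX, S ++ [((i + 1 : Nat) : Int), ((i + 2 : Nat) : Int)])).1
                  = resX ++ altGo l (i + 3) := by
              intro resX
              rw [PySem.List.pyRange_one_cons (by exact_mod_cast (by omega : i + 1 < l.length))]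
              have e3 : ((i + 1 : Nat) : Int) + 1 = ((i + 2 : Nat) : Int) := by push_cast; ring
              rw [e3]
              simp only [List.foldl_cons, stepA]
              have m1 : ((i + 1 : Nat) : Int) ∈ S ++ [((i + 1 : Nat) : Int), ((i + 2 : Nat) : Int)] := by
                simp
              rw [if_pos m1]
              rw [PySem.List.pyRange_one_cons (by exact_mod_cast hend)]
              have e4 : ((i + 2 : Nat) : Int) + 1 = ((i + 3 : Nat) : Int) := by push_cast; ring
              rw [e4]
              simp only [List.foldl_cons, stepA]
              have m2 : ((i + 2 : Nat) : Int) ∈ S ++ [((i + 1 : Nat) : Int), ((i + 2 : Nat) : Int)] := by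
                simp
              rw [if_pos m2]
              apply ih (i + 3) (by omega)
              intro j hj
              rcases List.mem_append.1 hj with h | h
              · have := hS _ h; push_cast; omega
              · simp at h; rcases h with h | h <;> (subst h; push_cast; omega)
            by_cases hp : l.getD (i + 2) "" = "perm"
            · rw [if_pos hp, if_pos hp, hskip2]; simp
            · rw [if_neg hp, if_neg hp]
              by_cases hl : l.getD (i + 2) "" = "lcm"
              · rw [if_pos hl, if_pos hl, hskip2]; simp
              · rw [if_neg hl, if_neg hl]
                by_cases hc : l.getD (i + 2) "" = "comb"
                · rw [if_pos hc, if_pos hc, hskip2]; simp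
                · rw [if_neg hc, if_neg hc]
                  rw [ih (i + 1) (by omega) S (res ++ [l.getD i ""])
                      (fun j hj => by have := hS _ hj; push_cast; omega)]
                  simp
          · -- i = len - 2 and 'math' '.' at the end: excluded by Pre_
            exfalso
            apply hPre
            rw [drop_sub_two l (by omega)]
            have eA : l.length - 2 = i := by omega
            have eB : l.length - 1 = i + 1 := by omega
            rw [eA, eB, hm.1, hm.2]
        · rw [if_neg hm, if_neg (by tauto)]
          rw [ih (i + 1) (by omega) S (res ++ [l.getD i ""])
              (fun j hj => by have := hS _ hj; push_cast; omega)]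
          simp
    · rw [PySem.List.pyRange_one_eq_nil (by omega), altGo, dif_neg (by omega)]
      simp

-- ===== VERDICT (by name: the statement is the Claim_ definition above) =====
theorem convert_math_method_spec : Claim_equal_convert_math_method := by
  intro l _ hPre
  unfold Spec_convert_math_method convert_math_method convert_math_method_alt
  split
  · rfl
  · simpa using loop_eq l hPre l.length 0 (by omega) [] [] (by simp)

@[simp] theorem convert_math_method_raises : Claim_raises_convert_math_method := by
  unfold Claim_raises_convert_math_method
  constructor
  · intro l _ hR hP; exact hP hR
  · refine ⟨by decide, by decide, ?_⟩
    unfold convert_math_method_alt pvRaiseWitness_convert_math_method pvRaiseWitnessOut_convert_math_method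
    rw [if_neg (by decide)]
    rw [altGo]; simp
    rw [altGo]; simp
    rw [altGo]; simp
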